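-- pv_equiv track=rewrite | github.com/erravamsi99/devpathy-insight | Back_end/devpathy/rules.py | severity_score
-- ===== SOURCE A (Python) =====
-- _SEVERITY_WORDS = {
--     2: ["terrible", "awful", "broken", "unacceptable", "never", "worst", "completely wrong"],
--     1: ["bad", "inefficient", "wrong", "poor", "confusing", "hacky"],
--     0: ["nit", "minor", "optional", "could"],
-- }
--
-- def severity_score(comment: str) -> int:
--     c = comment.lower()
--     score = 1  # default medium
--     for s, words in _SEVERITY_WORDS.items():
--         if any(w in c for w in words):
--             score = max(score, s)
--     # soften if contains courtesy markers
--     if any(x in c for x in ["please", "nit", "nit:", "suggestion"]):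
--         score = min(score, 1)
--     return score
-- ===== SOURCE B (Python) =====
-- # B: score 0 is unreachable and level-1 words are inert (score starts at 1),
-- # so the result is 1 if a courtesy marker appears, else 2 if a severe word appears, else 1.
-- _SEVERE = ["terrible", "awful", "broken", "unacceptable", "never", "worst", "completely wrong"]
-- _COURTESY = ["please", "nit", "suggestion"]
--
-- def severity_score(comment: str) -> int:
--     c = comment.lower()
--     if any(x in c for x in _COURTESY):
--         return 1
--     if any(w in c for w in _SEVERE):
--         return 2
--     return 1
-- ===== Notes on version B (the rewrite author's own statement) =====
-- stated objective: simpler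
-- what changed: Replaces the running-max fold over the three-level word dict plus a final min-capping step by two direct boolean checks: a courtesy marker forces 1, otherwise a severe word gives 2, else 1; the inert level-0/level-1 lists and the courtesy marker that is subsumed by a shorter one are dropped.
import Mathlib
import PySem

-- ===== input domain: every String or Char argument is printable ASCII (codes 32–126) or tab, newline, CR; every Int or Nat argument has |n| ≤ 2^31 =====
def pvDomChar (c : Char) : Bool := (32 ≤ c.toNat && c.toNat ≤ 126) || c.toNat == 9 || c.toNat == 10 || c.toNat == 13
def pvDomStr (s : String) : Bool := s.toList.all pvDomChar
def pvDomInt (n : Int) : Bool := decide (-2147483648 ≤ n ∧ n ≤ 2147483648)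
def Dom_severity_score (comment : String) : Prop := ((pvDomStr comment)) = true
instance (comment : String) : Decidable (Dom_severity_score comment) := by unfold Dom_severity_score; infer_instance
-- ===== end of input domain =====

-- B: two direct boolean checks (courtesy → 1, severe → 2, else 1) replace A's running-max fold over the word dict.
-- ===== PORT A =====
-- _SEVERITY_WORDS dict, iterated via .items() in insertion order
def pvSeverityWords : List (Int × List String) :=
  [(2, ["terrible", "awful", "broken", "unacceptable", "never", "worst", "completely wrong"]),
   (1, ["bad", "inefficient", "wrong", "poor", "confusing", "hacky"]),
   (0, ["nit", "minor", "optional", "could"])]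

def severity_score (comment : String) : Int :=
  let c := PySem.Str.lower comment
  let score : Int := 1
  let score := pvSeverityWords.foldl (fun score sw =>
    if sw.2.any (fun w => PySem.Str.isIn w c) then max score sw.1 else score) score
  if (["please", "nit", "nit:", "suggestion"] : List String).any (fun x => PySem.Str.isIn x c) then
    min score 1
  else score

-- ===== PORT B =====
def pvSevere : List String :=
  ["terrible", "awful", "broken", "unacceptable", "never", "worst", "completely wrong"]
def pvCourtesy : List String := ["please", "nit", "suggestion"]

def severity_score_alt (comment : String) : Int :=
  let c := PySem.Str.lower comment
  if pvCourtesy.any (fun x => PySem.Str.isIn x c) then 1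
  else if pvSevere.any (fun w => PySem.Str.isIn w c) then 2
  else 1

-- ===== PRECONDITION & SPEC =====
def Spec_severity_score (comment : String) (out : Int) : Prop := out = severity_score_alt comment
instance (comment : String) (out : Int) : Decidable (Spec_severity_score comment out) := by unfold Spec_severity_score; infer_instance

-- ===== CLAIM (what is proved, stated in full; the proofs are below) =====
def Claim_equal_severity_score : Prop := ∀ (comment : String), Dom_severity_score comment → Spec_severity_score comment (severity_score comment)

-- ===== LEMMAS AND PROOFS =====

-- ===== VERDICT (by name: the statement is the Claim_ definition above) =====
-- "nit" is a prefix of "nit:", so any occurrence of "nit:" contains "nit"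
theorem pv_nitcolon_imp_nit (c : String) (h : PySem.Str.isIn "nit:" c = true) :
    PySem.Str.isIn "nit" c = true := by
  rw [PySem.Str.isIn_iff_infix] at h ⊢
  exact List.IsInfix.trans (List.IsPrefix.isInfix (by decide)) h

-- the shape of A's unrolled fold vs B's two checks, over abstract booleans
theorem pv_bool_key (sev l1 l0 p n nc s : Bool) (h : nc = true → n = true) :
    (if (p || (n || (nc || (s || false)))) = true then min (if l0 = true then max (if l1 = true then max (if sev = true then max (1:Int) 2 else 1) 1 else (if sev = true then max (1:Int) 2 else 1)) 0 else (if l1 = true then max (if sev = true then max (1:Int) 2 else 1) 1 else (if sev = true then max (1:Int) 2 else 1))) 1 else (if l0 = true then max (if l1 = true then max (if sev = true then max (1:Int) 2 else 1) 1 else (if sev = true then max (1:Int) 2 else 1)) 0 else (if l1 = true then max (if sev = true then max (1:Int) 2 else 1) 1 else (if sev = true then max (1:Int) 2 else 1))))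
      = (if (p || (n || (s || false))) = true then (1:Int) else if sev = true then 2 else 1) := by
  cases sev <;> cases l1 <;> cases l0 <;> cases p <;> cases n <;> cases nc <;> cases s <;>
    simp_all

theorem severity_score_spec : Claim_equal_severity_score := by
  intro comment _
  unfold Spec_severity_score severity_score severity_score_alt pvSeverityWords pvSevere pvCourtesy
  simp only [List.foldl, List.any]
  exact pv_bool_key _ _ _ _ _ _ _ (pv_nitcolon_imp_nit _)
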